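-- pv_equiv track=rewrite | github.com/apostolovbg/webcam-micro | devcovenant/core/asset_materialization.py | _profile_priority_order
-- ===== SOURCE A (Python) =====
-- def _profile_priority_order(
--     registry: dict[str, dict[str, object]],
--     active_profiles: list[str],
-- ) -> list[str]:
--     """Return profile names in asset-selection priority order."""
--     ordered: list[str] = []
--     for name in active_profiles:
--         normalized = str(name or "").strip().lower()
--         if normalized and normalized in registry and normalized not in ordered:
--             ordered.append(normalized)
--     inactive = sorted(name for name in registry if name not in ordered)
--     return ordered + inactive
-- ===== SOURCE B (Python) =====
-- def _profile_priority_order(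
--     registry: dict[str, dict[str, object]],
--     active_profiles: list[str],
-- ) -> list[str]:
--     """Return profile names in asset-selection priority order."""
--     norms = [str(name or "").strip().lower() for name in active_profiles]
--     big = len(norms)
--     pos = {n: i for i, n in reversed(list(enumerate(norms)))}
--     return sorted(registry, key=lambda n: (pos.get(n, big) if n else big, n))
-- ===== Notes on version B (the rewrite author's own statement) =====
-- stated objective: alternative
-- what changed: A builds an accepted-name list with an accumulator loop using linear membership scans and returns it concatenated with a separately sorted remainder; B builds no intermediate ordered list at all: it maps active_profiles to their normalized forms, precomputes each name's first-occurrence index in one dict comprehension over the reversed enumeration, and produces the whole result by a single global sort of the registry keys under the composite key (first-occurrence index or a sentinel; then the name).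
import Mathlib
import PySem

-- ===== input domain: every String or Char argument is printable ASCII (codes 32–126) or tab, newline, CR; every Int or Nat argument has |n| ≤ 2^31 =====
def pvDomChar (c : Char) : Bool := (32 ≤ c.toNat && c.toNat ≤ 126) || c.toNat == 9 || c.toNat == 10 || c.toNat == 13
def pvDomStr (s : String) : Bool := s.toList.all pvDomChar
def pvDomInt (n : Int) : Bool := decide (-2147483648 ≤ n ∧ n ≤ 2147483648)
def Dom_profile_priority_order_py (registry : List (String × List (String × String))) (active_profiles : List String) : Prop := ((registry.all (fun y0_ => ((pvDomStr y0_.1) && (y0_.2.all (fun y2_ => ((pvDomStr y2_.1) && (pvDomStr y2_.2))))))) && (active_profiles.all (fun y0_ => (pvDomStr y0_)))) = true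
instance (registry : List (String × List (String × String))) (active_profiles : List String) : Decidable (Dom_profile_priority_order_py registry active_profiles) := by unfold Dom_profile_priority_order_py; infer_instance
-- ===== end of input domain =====

-- B replaces A's accumulator loop (with its linear membership scans) and two-part "ordered ++ sorted(rest)"
-- result by a first-occurrence position dict (one comprehension over the reversed enumerated normalized
-- names) and one global sort of all registry keys under the composite key (position or sentinel; name).
-- str(name or "").strip().lower() — for a str argument, `name or ""` is `name` itself
def pvNorm (name : String) : String := PySem.Str.lower (PySem.Str.strip name)

-- ===== PORT A =====
-- A's loop over active_profiles: 'if normalized and normalized in registry and normalized not in ordered: ordered.append(normalized)'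
def pvOrdLoop (d : PySem.Dict String (List (String × String))) (names : List String) (ordered : List String) : List String :=
  names.foldl (fun ordered name =>
    let normalized := pvNorm name
    if normalized ≠ "" ∧ d.contains normalized = true ∧ normalized ∉ ordered
    then ordered ++ [normalized] else ordered) ordered

def profile_priority_order_py (registry : List (String × List (String × String))) (active_profiles : List String) : List String :=
  let d := PySem.Dict.mk registry
  let ordered := pvOrdLoop d active_profiles []
  let inactive := PySem.List.sorted (d.keys.filter (fun name => decide (name ∉ ordered))) (fun name => name) false
  ordered ++ inactive

-- ===== PORT B =====
-- norms = [str(name or "").strip().lower() for name in active_profiles]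
-- pos = {n: i for i, n in reversed(list(enumerate(norms)))}
-- return sorted(registry, key=lambda n: (pos.get(n, big) if n else big, n))
def profile_priority_order_py_alt (registry : List (String × List (String × String))) (active_profiles : List String) : List String :=
  let norms := active_profiles.map (fun name => pvNorm name)
  let big : Int := (norms.length : Int)
  let pos : PySem.Dict String Int :=
    (norms.zipIdx.reverse).foldl (fun d p => d.insert p.1 (p.2 : Int)) PySem.Dict.empty
  PySem.List.sorted2 (PySem.Dict.mk registry).keys
    (fun n => if n ≠ "" then pos.getD n big else big) (fun n => n) false

-- ===== PRECONDITION & SPEC =====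
-- Pre_ excludes association lists with duplicate keys: a Python dict can never hold two equal keys,
-- so such lists represent no input the Python function ever receives.
def Pre_profile_priority_order_py (registry : List (String × List (String × String))) (active_profiles : List String) : Prop :=
  (registry.map Prod.fst).Nodup
instance (registry : List (String × List (String × String))) (active_profiles : List String) : Decidable (Pre_profile_priority_order_py registry active_profiles) := by unfold Pre_profile_priority_order_py; infer_instance
def pvWitness_profile_priority_order_py : (List (String × List (String × String))) × List String := ([("a", [("kind", "audio")])], ["A ", "b"])
def Spec_profile_priority_order_py (registry : List (String × List (String × String))) (active_profiles : List String) (out : List String) : Prop := out = profile_priority_order_py_alt registry active_profiles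
instance (registry : List (String × List (String × String))) (active_profiles : List String) (out : List String) : Decidable (Spec_profile_priority_order_py registry active_profiles out) := by unfold Spec_profile_priority_order_py; infer_instance

-- ===== CLAIM (what is proved, stated in full; the proofs are below) =====
def Claim_equal_profile_priority_order_py : Prop := ∀ (registry : List (String × List (String × String))) (active_profiles : List String), Dom_profile_priority_order_py registry active_profiles → Pre_profile_priority_order_py registry active_profiles → Spec_profile_priority_order_py registry active_profiles (profile_priority_order_py registry active_profiles)

-- ===== LEMMAS AND PROOFS =====

-- the list of names A's loop APPENDS to the accumulator o
def pvNew (d : PySem.Dict String (List (String × String))) : List String → List String → List String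
  | [], _ => []
  | x :: t, o =>
    if pvNorm x ≠ "" ∧ d.contains (pvNorm x) = true ∧ pvNorm x ∉ o
    then pvNorm x :: pvNew d t (o ++ [pvNorm x])
    else pvNew d t o

theorem pvOrdLoop_eq_append (d : PySem.Dict String (List (String × String))) (l : List String) :
    ∀ o : List String, pvOrdLoop d l o = o ++ pvNew d l o := by
  induction l with
  | nil => intro o; simp [pvOrdLoop, pvNew]
  | cons x t ih =>
    intro o
    simp only [pvOrdLoop, List.foldl_cons, pvNew] at *
    by_cases h : pvNorm x ≠ "" ∧ d.contains (pvNorm x) = true ∧ pvNorm x ∉ o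
    · rw [if_pos h, if_pos h, ih (o ++ [pvNorm x]), List.append_assoc]; rfl
    · rw [if_neg h, if_neg h, ih o]

-- every appended name is new, nonempty, a registry key, and a normalized active name
theorem pvNew_mem (d : PySem.Dict String (List (String × String))) (l : List String) :
    ∀ o n, n ∈ pvNew d l o →
      n ∉ o ∧ n ≠ "" ∧ d.contains n = true ∧ n ∈ l.map (fun name => pvNorm name) := by
  induction l with
  | nil => intro o n h; simp [pvNew] at h
  | cons x t ih =>
    intro o n h
    simp only [pvNew] at h
    by_cases hc : pvNorm x ≠ "" ∧ d.contains (pvNorm x) = true ∧ pvNorm x ∉ o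
    · rw [if_pos hc] at h
      rcases List.mem_cons.1 h with rfl | h'
      · exact ⟨hc.2.2, hc.1, hc.2.1, by simp⟩
      · obtain ⟨ho, h1, h2, h3⟩ := ih _ n h'
        exact ⟨fun hn => ho (List.mem_append_left _ hn), h1, h2, by simp [h3]⟩
    · rw [if_neg hc] at h
      obtain ⟨ho, h1, h2, h3⟩ := ih o n h
      exact ⟨ho, h1, h2, by simp [h3]⟩

theorem pvNew_nodup (d : PySem.Dict String (List (String × String))) (l : List String) :
    ∀ o : List String, (pvNew d l o).Nodup := by
  induction l with
  | nil => intro o; simp [pvNew]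
  | cons x t ih =>
    intro o
    simp only [pvNew]
    by_cases hc : pvNorm x ≠ "" ∧ d.contains (pvNorm x) = true ∧ pvNorm x ∉ o
    · rw [if_pos hc]
      refine List.nodup_cons.2 ⟨fun hm => ?_, ih _⟩
      exact (pvNew_mem d t _ _ hm).1 (List.mem_append_right _ (by simp))
    · rw [if_neg hc]; exact ih o

theorem pvOrdLoop_cons (d : PySem.Dict String (List (String × String))) (x : String) (t o : List String) :
    pvOrdLoop d (x :: t) o = pvOrdLoop d t
      (if pvNorm x ≠ "" ∧ d.contains (pvNorm x) = true ∧ pvNorm x ∉ o then o ++ [pvNorm x] else o) := by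
  simp only [pvOrdLoop, List.foldl_cons]

-- completeness: a nonempty registry key that occurs among the normalized names is collected
theorem pvOrdLoop_complete (d : PySem.Dict String (List (String × String))) (l : List String) :
    ∀ o n, n ∈ l.map (fun name => pvNorm name) → n ≠ "" → d.contains n = true →
      n ∈ pvOrdLoop d l o := by
  induction l with
  | nil => intro o n h; simp at h
  | cons x t ih =>
    intro o n hm hne hc
    rw [pvOrdLoop_cons]
    rw [List.map_cons] at hm
    rcases List.mem_cons.1 hm with heq | hm'
    · subst heq
      by_cases ho : pvNorm x ∈ o
      · split_ifs with hc' <;> rw [pvOrdLoop_eq_append] <;>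
          exact List.mem_append_left _ (by simp [ho])
      · rw [if_pos ⟨hne, hc, ho⟩, pvOrdLoop_eq_append]
        exact List.mem_append_left _ (by simp)
    · split_ifs with hc' <;> exact ih _ _ hm' hne hc

-- collected names are pairwise ordered by their FIRST OCCURRENCE in the normalized active list
theorem pvNew_pairwise_index (d : PySem.Dict String (List (String × String))) (l : List String) :
    ∀ o : List String, (pvNew d l o).Pairwise (fun a b =>
      ∃ i j, PySem.List.index? (l.map (fun name => pvNorm name)) a = some i ∧
             PySem.List.index? (l.map (fun name => pvNorm name)) b = some j ∧ i < j) := by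
  induction l with
  | nil => intro o; simp [pvNew]
  | cons x t ih =>
    intro o
    have hlift : ∀ o' : List String, ∀ a ∈ pvNew d t o', ∀ b ∈ pvNew d t o',
        (∃ i j, PySem.List.index? (t.map (fun name => pvNorm name)) a = some i ∧
                PySem.List.index? (t.map (fun name => pvNorm name)) b = some j ∧ i < j) →
        a ≠ pvNorm x → b ≠ pvNorm x →
        (∃ i j, PySem.List.index? ((x :: t).map (fun name => pvNorm name)) a = some i ∧
                PySem.List.index? ((x :: t).map (fun name => pvNorm name)) b = some j ∧ i < j) := by
      rintro o' a - b - ⟨i, j, hia, hjb, hij⟩ hax hbx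
      refine ⟨i + 1, j + 1, ?_, ?_, by omega⟩
      · rw [List.map_cons, PySem.List.index?_cons_of_ne _ (Ne.symm hax), hia]; rfl
      · rw [List.map_cons, PySem.List.index?_cons_of_ne _ (Ne.symm hbx), hjb]; rfl
    simp only [pvNew]
    by_cases hc : pvNorm x ≠ "" ∧ d.contains (pvNorm x) = true ∧ pvNorm x ∉ o
    · rw [if_pos hc]
      refine List.pairwise_cons.2 ⟨?_, ?_⟩
      · intro b hb
        have hmem := pvNew_mem d t _ _ hb
        have hbx : b ≠ pvNorm x := fun h => hmem.1 (List.mem_append_right _ (by simp [h]))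
        have hbt : b ∈ t.map (fun name => pvNorm name) := hmem.2.2.2
        obtain ⟨j, hj⟩ := Option.isSome_iff_exists.1 ((PySem.List.index?_isSome_iff _ _).2 hbt)
        refine ⟨0, j + 1, ?_, ?_, by omega⟩
        · rw [List.map_cons]; exact PySem.List.index?_cons_self _ _
        · rw [List.map_cons, PySem.List.index?_cons_of_ne _ (Ne.symm hbx), hj]; rfl
      · refine List.Pairwise.imp_of_mem ?_ (ih _)
        intro a b ha hb hab
        have hax : a ≠ pvNorm x := fun h =>
          (pvNew_mem d t _ _ ha).1 (List.mem_append_right _ (by simp [h]))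
        have hbx : b ≠ pvNorm x := fun h =>
          (pvNew_mem d t _ _ hb).1 (List.mem_append_right _ (by simp [h]))
        exact hlift _ a ha b hb hab hax hbx
    · rw [if_neg hc]
      refine List.Pairwise.imp_of_mem ?_ (ih o)
      intro a b ha hb hab
      have hax : a ≠ pvNorm x := by
        rintro rfl
        obtain ⟨ho, h1, h2, _⟩ := pvNew_mem d t o _ ha
        exact hc ⟨h1, h2, ho⟩
      have hbx : b ≠ pvNorm x := by
        rintro rfl
        obtain ⟨ho, h1, h2, _⟩ := pvNew_mem d t o _ hb
        exact hc ⟨h1, h2, ho⟩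
      exact hlift o a ha b hb hab hax hbx

theorem pv_sorted2_eq_sorted_lex (xs : List String) (k1 : String → Int) :
    PySem.List.sorted2 xs k1 (fun n => n) false
      = PySem.List.sorted xs (fun n => toLex (k1 n, n)) false := by
  rw [PySem.List.sorted_eq_foldl_insertBy]
  simp only [PySem.List.sorted2]
  congr 1
  funext acc x
  congr 1
  funext a b
  rcases lt_trichotomy (k1 a) (k1 b) with h | h | h
  · simp [Prod.Lex.toLex_lt_toLex, h]
  · simp [Prod.Lex.toLex_lt_toLex, h]
  · simp [Prod.Lex.toLex_lt_toLex, h, asymm h, ne_of_gt h]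

-- the reversed-insertion position dict holds each name's FIRST index (last write wins)
theorem pvPos_getD (n : String) (big : Int) :
    ∀ (norms : List String) (k : Nat) (d0 : PySem.Dict String Int),
      (((norms.zipIdx k).reverse).foldl (fun d p => d.insert p.1 (p.2 : Int)) d0).getD n big
        = match PySem.List.index? norms n with
          | some i => ((i + k : Nat) : Int)
          | none => d0.getD n big := by
  intro norms
  induction norms with
  | nil =>
    intro k d0
    simp [PySem.List.index?_eq_idxOf?]
  | cons x t ih =>
    intro k d0
    rw [List.zipIdx_cons, List.reverse_cons, List.foldl_append]
    simp only [List.foldl_cons, List.foldl_nil]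
    by_cases hx : n = x
    · subst hx
      rw [PySem.Dict.getD_insert_self, PySem.List.index?_cons_self]
      simp
    · rw [PySem.Dict.getD_insert_of_ne _ _ _ hx, ih (k + 1) d0,
        PySem.List.index?_cons_of_ne _ (Ne.symm hx)]
      cases PySem.List.index? t n with
      | none => rfl
      | some i =>
        show ((i + (k + 1) : Nat) : Int) = (((i + 1) + k : Nat) : Int)
        congr 1
        omega

-- ===== VERDICT (by name: the statement is the Claim_ definition above) =====
theorem profile_priority_order_py_spec : Claim_equal_profile_priority_order_py := by
  intro registry active _ hpre
  show profile_priority_order_py registry active = profile_priority_order_py_alt registry active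
  show pvOrdLoop (PySem.Dict.mk registry) active [] ++ _ = _
  set d := PySem.Dict.mk registry with hd
  set norms := active.map (fun name => pvNorm name) with hnorms
  set big : Int := (norms.length : Int) with hbig
  set pos : PySem.Dict String Int :=
    (norms.zipIdx.reverse).foldl (fun d p => d.insert p.1 (p.2 : Int)) PySem.Dict.empty with hpos
  set kB : String → Int := fun n => if n ≠ "" then pos.getD n big else big with hkB
  have hposD : ∀ n, pos.getD n big = match PySem.List.index? norms n with
      | some i => (i : Int) | none => big := by
    intro n
    have h := pvPos_getD n big norms 0 PySem.Dict.empty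
    rw [hpos]
    rw [h]
    cases PySem.List.index? norms n with
    | none => simp [PySem.Dict.getD_empty]
    | some i => simp
  have hord : pvOrdLoop d active [] = pvNew d active [] := by
    rw [pvOrdLoop_eq_append]; rfl
  set ordered := pvOrdLoop d active [] with hordeq
  set rest := d.keys.filter (fun name => decide (name ∉ ordered)) with hrest
  have hnodupK : d.keys.Nodup := by
    simpa [hd, PySem.Dict.keys_mk] using hpre
  have hmemO : ∀ n ∈ ordered, n ∉ ([] : List String) ∧ n ≠ "" ∧ d.contains n = true ∧ n ∈ norms := by
    intro n hn; exact pvNew_mem d active [] n (hord ▸ hn)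
  have hordN : ordered.Nodup := hord ▸ pvNew_nodup d active []
  have hsub : ∀ n ∈ ordered, n ∈ d.keys := fun n hn =>
    (PySem.Dict.contains_iff_mem_keys d n).1 (hmemO n hn).2.2.1
  have hrestmem : ∀ n ∈ rest, n ∉ ordered := by
    intro n hn; simpa using (List.mem_filter.1 hn).2
  -- key value on collected names: the first-occurrence index, strictly below the sentinel
  have hkO : ∀ n ∈ ordered, ∀ i, PySem.List.index? norms n = some i → kB n = (i : Int) ∧ (i : Int) < big := by
    intro n hn i hi
    obtain ⟨_, hne, _, hmem⟩ := hmemO n hn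
    obtain ⟨hlt, _, _⟩ := PySem.List.getElem_of_index?_eq_some hi
    refine ⟨?_, by rw [hbig]; exact_mod_cast hlt⟩
    have h2 := hposD n
    rw [hi] at h2
    show (if n ≠ "" then pos.getD n big else big) = (i : Int)
    rw [if_pos hne, h2]
  -- key value on the rest: the sentinel
  have hkR : ∀ n ∈ rest, kB n = big := by
    intro n hn
    have hnk := (List.mem_filter.1 hn).1
    by_cases hne : n = ""
    · simp [hkB, hne]
    · by_cases hmem : n ∈ norms
      · exact absurd (pvOrdLoop_complete d active [] n hmem hne
          ((PySem.Dict.contains_iff_mem_keys d n).2 hnk)) (hrestmem n hn)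
      · have h2 := hposD n
        rw [(PySem.List.index?_eq_none_iff _ _).2 hmem] at h2
        show (if n ≠ "" then pos.getD n big else big) = big
        rw [if_pos hne, h2]
  have hpair : ordered.Pairwise (fun a b =>
      ∃ i j, PySem.List.index? norms a = some i ∧ PySem.List.index? norms b = some j ∧ i < j) :=
    hord ▸ pvNew_pairwise_index d active []
  -- B is a single sort by the lexicographic key (first index or sentinel, name)
  show _ = PySem.List.sorted2 d.keys kB (fun n => n) false
  rw [pv_sorted2_eq_sorted_lex]
  -- the sorted order is named by A's output: a strictly key-increasing rearrangement of the keys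
  refine (PySem.List.sorted_eq_of_perm_of_pairwise_lt _ _ _ ?_ ?_).symm
  · -- permutation
    have hfp : d.keys.filter (fun n => !decide (n ∈ ordered)) = rest := by
      rw [hrest]; exact List.filter_congr (by intro n _; simp)
    have h2 : (d.keys.filter (fun n => decide (n ∈ ordered))).Perm ordered := by
      refine (List.perm_ext_iff_of_nodup (hnodupK.filter _) hordN).2 ?_
      intro a
      simp only [List.mem_filter, decide_eq_true_eq]
      exact ⟨fun h => h.2, fun h => ⟨hsub a h, h⟩⟩
    have hs : (PySem.List.sorted rest (fun n => n) false).Perm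
        (d.keys.filter (fun n => !decide (n ∈ ordered))) := by
      rw [hfp]; exact PySem.List.sorted_perm _ _ _
    exact (h2.symm.append hs).trans (List.filter_append_perm _ _)
  · -- strictly increasing under the lex key
    refine List.pairwise_append.2 ⟨?_, ?_, ?_⟩
    · refine List.Pairwise.imp_of_mem ?_ hpair
      intro a b ha hb hab
      obtain ⟨i, j, hia, hjb, hij⟩ := hab
      rw [(hkO a ha i hia).1, (hkO b hb j hjb).1, Prod.Lex.toLex_lt_toLex]
      exact Or.inl (by simpa using (show (i : Int) < (j : Int) by exact_mod_cast hij))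
    · have hrestN : rest.Nodup := hnodupK.filter _
      have hsN : (PySem.List.sorted rest (fun n => n) false).Nodup :=
        ((PySem.List.sorted_perm _ _ _).nodup_iff).2 hrestN
      have hple : (PySem.List.sorted rest (fun n => n) false).Pairwise (fun a b => a ≤ b) :=
        PySem.List.sorted_pairwise _ _
      refine (hple.and hsN).imp_of_mem ?_
      intro a b ha hb hab
      have haR : a ∈ rest := (PySem.List.mem_sorted _ _ _ _).1 ha
      have hbR : b ∈ rest := (PySem.List.mem_sorted _ _ _ _).1 hb
      rw [hkR a haR, hkR b hbR, Prod.Lex.toLex_lt_toLex]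
      exact Or.inr ⟨rfl, lt_of_le_of_ne hab.1 hab.2⟩
    · intro a ha b hb
      have hbR : b ∈ rest := (PySem.List.mem_sorted _ _ _ _).1 hb
      obtain ⟨i, hi⟩ := Option.isSome_iff_exists.1
        ((PySem.List.index?_isSome_iff _ _).2 (hmemO a ha).2.2.2)
      rw [(hkO a ha i hi).1, hkR b hbR, Prod.Lex.toLex_lt_toLex]
      exact Or.inl (hkO a ha i hi).2
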